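-- pv_equiv track=rewrite | github.com/ThejanB/ImagePrecessing | Canny Edge Detection/CannyEdgeDetection.py | pad_image
-- ===== SOURCE A (Python) =====
-- def pad_image(image, pad_size, mode='edge'):
--     height = len(image)
--     width = len(image[0])
--     new_height = height + 2 * pad_size
--     new_width = width + 2 * pad_size
--     padded_image = [[0 for _ in range(new_width)] for _ in range(new_height)]
--     for i in range(height):
--         for j in range(width):
--             padded_image[i + pad_size][j + pad_size] = image[i][j]
--     # Handle the edges
--     if mode == 'edge':
--         # Top and bottom
--         for i in range(pad_size):
--             padded_image[i][pad_size:-pad_size] = padded_image[pad_size][pad_size:-pad_size]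
--             padded_image[-(i+1)][pad_size:-pad_size] = padded_image[-(pad_size+1)][pad_size:-pad_size]
--         # Left and right
--         for i in range(new_height):
--             for j in range(pad_size):
--                 padded_image[i][j] = padded_image[i][pad_size]
--                 padded_image[i][-(j+1)] = padded_image[i][-(pad_size+1)]
--     return padded_image
-- ===== SOURCE B (Python) =====
-- def pad_image(image, pad_size, mode='edge'):
--     height = len(image)
--     width = len(image[0])
--     new_height = height + 2 * pad_size
--     new_width = width + 2 * pad_size
--     if mode == 'edge':
--         # one pass: each output cell reads the clamped source coordinate
--         return [[image[min(max(i - pad_size, 0), height - 1)]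
--                       [min(max(j - pad_size, 0), width - 1)]
--                  for j in range(new_width)]
--                 for i in range(new_height)]
--     # non-edge modes: interior copy, zero border
--     return [[image[i - pad_size][j - pad_size]
--              if pad_size <= i < height + pad_size and pad_size <= j < width + pad_size
--              else 0
--              for j in range(new_width)]
--             for i in range(new_height)]
-- ===== Notes on version B (the rewrite author's own statement) =====
-- stated objective: simpler
-- what changed: A builds a zero grid, copies the interior, then mutates border rows/columns in three replicate phases; B builds the padded grid in one comprehension pass, reading each output cell directly from the clamped source coordinate (edge mode) or from the interior-or-zero condition (other modes).
-- outside the precondition, e.g. on pad_image([[]], 1, 'edge'): A returns [[0, 0], [0, 0], [0, 0]], B raises IndexError; on pad_image([[], [], []], -1, 'x'): A returns [[]], B returns [[]]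
import Mathlib
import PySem

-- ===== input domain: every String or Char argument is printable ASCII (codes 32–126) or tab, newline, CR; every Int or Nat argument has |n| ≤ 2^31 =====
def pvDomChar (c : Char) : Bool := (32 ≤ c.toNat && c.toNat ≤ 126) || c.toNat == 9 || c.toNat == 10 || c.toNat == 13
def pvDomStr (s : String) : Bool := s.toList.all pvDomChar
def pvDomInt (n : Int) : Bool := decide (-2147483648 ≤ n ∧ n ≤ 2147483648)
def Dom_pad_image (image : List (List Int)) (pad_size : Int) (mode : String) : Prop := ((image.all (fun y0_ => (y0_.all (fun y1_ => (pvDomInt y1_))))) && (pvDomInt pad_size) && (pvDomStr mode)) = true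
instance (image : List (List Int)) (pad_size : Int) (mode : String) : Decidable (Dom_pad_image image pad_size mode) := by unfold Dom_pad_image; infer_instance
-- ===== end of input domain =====

-- B replaces A's copy-then-replicate-borders mutation phases by a single clamped-coordinate
-- comprehension pass (objective: simpler); equivalence of return values is proved on Pre_ below.

-- ===== PORT A =====
-- hand-ported helper: Python slice assignment xs[a:b] = ys (step 1), exact: both bounds are
-- clamped like Python slice bounds and the stop index never resolves before the start.
def spliceAssign (xs : List Int) (a b : Int) (ys : List Int) : List Int :=
  let s := PySem.List.clampIdx xs.length a
  let e := max (PySem.List.clampIdx xs.length b) s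
  xs.take s ++ ys ++ xs.drop e

def pad_image (image : List (List Int)) (pad_size : Int) (mode : String) : List (List Int) :=
  let height : Int := PySem.List.len image
  let width : Int := PySem.List.len (PySem.List.pyGetD image 0 [])
  let new_height : Int := height + 2 * pad_size
  let new_width : Int := width + 2 * pad_size
  let padded0 : List (List Int) :=
    (PySem.List.pyRange 0 new_height 1).map (fun _ =>
      (PySem.List.pyRange 0 new_width 1).map (fun _ => (0 : Int)))
  -- interior copy
  let padded1 :=
    (PySem.List.pyRange 0 height 1).foldl (fun pd i =>
      (PySem.List.pyRange 0 width 1).foldl (fun pd j =>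
        PySem.List.pySetD pd (i + pad_size)
          (PySem.List.pySetD (PySem.List.pyGetD pd (i + pad_size) []) (j + pad_size)
            (PySem.List.pyGetD (PySem.List.pyGetD image i []) j 0))) pd) padded0
  if mode = "edge" then
    -- top and bottom
    let padded2 :=
      (PySem.List.pyRange 0 pad_size 1).foldl (fun pd i =>
        let pd := PySem.List.pySetD pd i
          (spliceAssign (PySem.List.pyGetD pd i []) pad_size (-pad_size)
            (PySem.List.slice (PySem.List.pyGetD pd pad_size []) (some pad_size) (some (-pad_size))))
        PySem.List.pySetD pd (-(i + 1))
          (spliceAssign (PySem.List.pyGetD pd (-(i + 1)) []) pad_size (-pad_size)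
            (PySem.List.slice (PySem.List.pyGetD pd (-(pad_size + 1)) []) (some pad_size) (some (-pad_size))))) padded1
    -- left and right (Python mutates the row in place: read row, two writes, write back)
    (PySem.List.pyRange 0 new_height 1).foldl (fun pd i =>
      (PySem.List.pyRange 0 pad_size 1).foldl (fun pd j =>
        let row := PySem.List.pyGetD pd i []
        let row := PySem.List.pySetD row j (PySem.List.pyGetD row pad_size 0)
        let row := PySem.List.pySetD row (-(j + 1)) (PySem.List.pyGetD row (-(pad_size + 1)) 0)
        PySem.List.pySetD pd i row) pd) padded2
  else padded1

-- ===== PORT B =====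
def pad_image_alt (image : List (List Int)) (pad_size : Int) (mode : String) : List (List Int) :=
  let height : Int := PySem.List.len image
  let width : Int := PySem.List.len (PySem.List.pyGetD image 0 [])
  let new_height : Int := height + 2 * pad_size
  let new_width : Int := width + 2 * pad_size
  if mode = "edge" then
    (PySem.List.pyRange 0 new_height 1).map (fun i =>
      (PySem.List.pyRange 0 new_width 1).map (fun j =>
        PySem.List.pyGetD
          (PySem.List.pyGetD image (min (max (i - pad_size) 0) (height - 1)) [])
          (min (max (j - pad_size) 0) (width - 1)) 0))
  else
    (PySem.List.pyRange 0 new_height 1).map (fun i =>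
      (PySem.List.pyRange 0 new_width 1).map (fun j =>
        if pad_size ≤ i ∧ i < height + pad_size ∧ pad_size ≤ j ∧ j < width + pad_size then
          PySem.List.pyGetD (PySem.List.pyGetD image (i - pad_size) []) (j - pad_size) 0
        else 0))

-- ===== PRECONDITION & SPEC =====
-- Pre_ excludes exactly: empty images and rows shorter than row 0 (Python A raises IndexError
-- in the interior copy), negative pad_size (A raises IndexError except on degenerate
-- zero-width images), and edge-mode padding of a zero-width row 0 with pad_size > 0
-- (A returns all-zero rows there while B's clamped column index -1 raises IndexError).
def Pre_pad_image (image : List (List Int)) (pad_size : Int) (mode : String) : Prop :=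
  image ≠ [] ∧ 0 ≤ pad_size ∧
  (∀ row ∈ image, (PySem.List.pyGetD image 0 []).length ≤ row.length) ∧
  (mode = "edge" → 0 < pad_size → PySem.List.pyGetD image 0 [] ≠ [])
instance (image : List (List Int)) (pad_size : Int) (mode : String) : Decidable (Pre_pad_image image pad_size mode) := by unfold Pre_pad_image; infer_instance

def pvWitness_pad_image : List (List Int) × Int × String := ([[1, 2], [3, 4]], 1, "edge")

def Spec_pad_image (image : List (List Int)) (pad_size : Int) (mode : String) (out : List (List Int)) : Prop := out = pad_image_alt image pad_size mode
instance (image : List (List Int)) (pad_size : Int) (mode : String) (out : List (List Int)) : Decidable (Spec_pad_image image pad_size mode out) := by unfold Spec_pad_image; infer_instance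

-- ===== CLAIM (what is proved, stated in full; the proofs are below) =====
def Claim_equal_pad_image : Prop := ∀ (image : List (List Int)) (pad_size : Int) (mode : String), Dom_pad_image image pad_size mode → Pre_pad_image image pad_size mode → Spec_pad_image image pad_size mode (pad_image image pad_size mode)

-- ===== LEMMAS AND PROOFS =====

-- setting one cell of a comprehension row keeps it a comprehension row
theorem set_map_range {α : Type} (n k : Nat) (f : Nat → α) (v : α) :
    ((List.range n).map f).set k v
      = (List.range n).map (fun a => if a = k then v else f a) := by
  apply List.ext_getElem
  · simp
  · intro i h1 h2
    simp only [List.getElem_set, List.getElem_map, List.getElem_range]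
    split_ifs <;> first | rfl | omega

theorem getD_map_range_lt {α : Type} (n b : Nat) (f : Nat → α) (d : α) (hb : b < n) :
    ((List.range n).map f).getD b d = f b := by
  rw [List.getD_eq_getElem _ _ (by simpa using hb)]
  simp

-- two grids of comprehension rows are equal when their cell formulas agree in range
theorem mapgrid_congr (nh nw : Nat) (F G : Nat → Nat → Int)
    (h : ∀ a, a < nh → ∀ b, b < nw → F a b = G a b) :
    (List.range nh).map (fun a => (List.range nw).map (fun b => F a b))
      = (List.range nh).map (fun a => (List.range nw).map (fun b => G a b)) := by
  apply List.map_congr_left; intro a ha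
  apply List.map_congr_left; intro b hb
  exact h a (List.mem_range.mp ha) b (List.mem_range.mp hb)

theorem grid_set_row (nh nw k : Nat) (F : Nat → Nat → Int) (g : Nat → Int) :
    ((List.range nh).map (fun a => (List.range nw).map (fun b => F a b))).set k
        ((List.range nw).map (fun b => g b))
      = (List.range nh).map (fun a => (List.range nw).map (fun b => if a = k then g b else F a b)) := by
  rw [set_map_range]
  apply List.map_congr_left; intro a _
  by_cases h : a = k
  · rw [if_pos h]
    apply List.map_congr_left; intro b _
    rw [if_pos h]
  · rw [if_neg h]
    apply List.map_congr_left; intro b _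
    rw [if_neg h]

theorem grid_get_row (nh nw k : Nat) (F : Nat → Nat → Int) (hk : k < nh) :
    ((List.range nh).map (fun a => (List.range nw).map (fun b => F a b))).getD k []
      = (List.range nw).map (fun b => F k b) :=
  getD_map_range_lt nh k _ [] hk

-- Python assignment xs[-(k+1)] = v resolved to a front index
theorem pySetD_neg_succ {α : Type} (xs : List α) (k : Nat) (v : α) (h : k < xs.length) :
    PySem.List.pySetD xs (-(↑k + 1)) v = xs.set (xs.length - (k + 1)) v := by
  have h2 : (-(↑k + 1) : Int) = -((k+1 : Nat) : Int) := by push_cast; ring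
  rw [h2]
  simp only [PySem.List.pySetD, PySem.List.pySet?, PySem.List.pyIdx?]
  rw [if_neg (by omega), if_pos (by omega)]
  simp

-- Python read xs[-(k+1)] resolved to a front index
theorem pyGetD_neg_succ {α : Type} (xs : List α) (k : Nat) (d : α) (h : k < xs.length) :
    PySem.List.pyGetD xs (-(↑k + 1)) d = xs.getD (xs.length - (k + 1)) d := by
  have h2 : (-(↑k + 1) : Int) = -(((k+1 : Nat) : Int)) := by push_cast; ring
  rw [h2, PySem.List.pyGetD_neg_natCast xs _ d (by omega) (by omega)]
  rw [List.getD_eq_getElem _ _ (by omega)]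

theorem range_split (s m n : Nat) (h : s + m ≤ n) :
    List.range n = List.range s ++ (List.range m).map (fun k => s + k)
      ++ (List.range (n - (s + m))).map (fun k => s + m + k) := by
  have h1 : n = (s + m) + (n - (s+m)) := by omega
  rw [List.append_assoc]
  nth_rewrite 1 [h1]
  rw [List.range_add, List.range_add]
  simp [Nat.add_assoc]

theorem take_append_drop_splice {α : Type} (A B C ys : List α) (s m : Nat)
    (hA : A.length = s) (hB : B.length = m) :
    (A ++ B ++ C).take s ++ ys ++ (A ++ B ++ C).drop (s + m) = A ++ ys ++ C := by
  have h1 : (A ++ B ++ C).take s = A := by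
    rw [List.append_assoc, ← hA, List.take_left]
  have h2 : (A ++ B ++ C).drop (s + m) = C := by
    have : (A ++ B).length = s + m := by simp [hA, hB]
    rw [← this, List.drop_left]
  rw [h1, h2]

theorem splice_map_range {α : Type} (n m s : Nat) (f g : Nat → α) (hsm : s + m ≤ n) :
    (((List.range n).map f).take s ++ ((List.range m).map g) ++ ((List.range n).map f).drop (s + m))
      = (List.range n).map (fun b => if b < s then f b else if b < s + m then g (b - s) else f b) := by
  have hfull : (List.range n).map f
      = (List.range s).map f ++ ((List.range m).map (fun k => f (s + k)))
        ++ ((List.range (n - (s + m))).map (fun k => f (s + m + k))) := by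
    nth_rewrite 1 [range_split s m n hsm]
    simp [Function.comp_def]
  rw [hfull, take_append_drop_splice _ _ _ _ s m (by simp) (by simp)]
  conv_rhs => rw [range_split s m n hsm]
  simp only [List.map_append, List.map_map]
  congr 1
  · congr 1
    · apply List.map_congr_left; intro a ha; simp only [List.mem_range] at ha; simp [ha]
    · apply List.map_congr_left; intro a ha; simp only [List.mem_range] at ha
      simp only [Function.comp_apply]
      rw [if_neg (by omega), if_pos (by omega)]
      congr 1; omega
  · apply List.map_congr_left; intro a ha; simp only [List.mem_range] at ha
    simp only [Function.comp_apply]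
    rw [if_neg (by omega), if_neg (by omega)]

theorem drop_take_map_range {α : Type} (n s m : Nat) (f : Nat → α) (hsm : s + m ≤ n) :
    ((((List.range n).map f).drop s).take m) = (List.range m).map (fun k => f (s + k)) := by
  apply List.ext_getElem
  · simp; omega
  · intro i h1 h2
    simp_all

-- the Python slice row[P:-P] of a comprehension row
theorem slice_map_row (nw P W : Nat) (f : Nat → Int) (hnw : nw = W + 2*P) (hP : 0 < P) :
    PySem.List.slice ((List.range nw).map (fun b => f b)) (some (↑P)) (some (-↑P))
      = (List.range W).map (fun k => f (P + k)) := by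
  simp only [PySem.List.slice, List.length_map, List.length_range,
    PySem.List.clampIdx_natCast, PySem.List.clampIdx_neg_natCast _ _ hP]
  have e1 : min P nw = P := by omega
  rw [e1]
  have e3 : nw - P - P = W := by omega
  rw [e3]
  exact drop_take_map_range nw P W f (by omega)

-- the Python slice assignment row[P:-P] = seg on a comprehension row
theorem spliceAssign_map (nw P W : Nat) (f g : Nat → Int) (hnw : nw = W + 2*P) (hP : 0 < P) :
    spliceAssign ((List.range nw).map (fun b => f b)) (↑P) (-↑P) ((List.range W).map (fun k => g k))
      = (List.range nw).map (fun b => if b < P then f b else if b < P + W then g (b - P) else f b) := by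
  simp only [spliceAssign, List.length_map, List.length_range,
    PySem.List.clampIdx_natCast, PySem.List.clampIdx_neg_natCast _ _ hP]
  have e1 : min P nw = P := by omega
  rw [e1]
  have e3 : max (nw - P) P = P + W := by omega
  rw [e3]
  exact splice_map_range nw W P f g (by omega)

-- phase 1 (interior copy), inner loop over one row
theorem interior_inner (P i nh nw : Nat) (v1 : Nat → Int) (F : Nat → Nat → Int)
    (hi : i + P < nh) :
    ∀ m, m + P ≤ nw →
    List.foldl (fun x y1 => x.set (i+P) ((x.getD (i+P) []).set (y1+P) (v1 y1)))
      ((List.range nh).map (fun a => (List.range nw).map (fun b => F a b))) (List.range m)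
    = (List.range nh).map (fun a => (List.range nw).map (fun b =>
        if a = i + P ∧ P ≤ b ∧ b < P + m then v1 (b - P) else F a b)) := by
  intro m
  induction m with
  | zero =>
    intro _
    simp only [List.range_zero, List.foldl_nil]
    apply mapgrid_congr; intro a ha b hb
    rw [if_neg (by omega)]
  | succ m ih =>
    intro hm
    rw [List.range_succ, List.foldl_append, ih (by omega), List.foldl_cons, List.foldl_nil]
    rw [grid_get_row nh nw (i+P) _ hi, set_map_range nw (m+P), grid_set_row]
    apply mapgrid_congr; intro a ha b hb
    by_cases hA : a = i + P
    · subst hA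
      rw [if_pos rfl]
      split_ifs <;> first | rfl | omega | (congr 1; omega)
    · rw [if_neg hA]
      split_ifs <;> first | rfl | omega

-- phase 1 (interior copy), outer loop over all rows
theorem interior_outer (P W nh nw : Nat) (v : Nat → Nat → Int) (F : Nat → Nat → Int) :
    ∀ n, n + P ≤ nh → P + W ≤ nw →
    List.foldl (fun x y =>
        List.foldl (fun x y1 => x.set (y+P) ((x.getD (y+P) []).set (y1+P) (v y y1))) x (List.range W))
      ((List.range nh).map (fun a => (List.range nw).map (fun b => F a b))) (List.range n)
    = (List.range nh).map (fun a => (List.range nw).map (fun b =>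
        if P ≤ a ∧ a < P + n ∧ P ≤ b ∧ b < P + W then v (a - P) (b - P) else F a b)) := by
  intro n
  induction n with
  | zero =>
    intro _ _
    simp only [List.range_zero, List.foldl_nil]
    apply mapgrid_congr; intro a ha b hb
    rw [if_neg (by omega)]
  | succ n ih =>
    intro hn hW
    rw [List.range_succ, List.foldl_append, ih (by omega) hW, List.foldl_cons, List.foldl_nil]
    rw [interior_inner P n nh nw _ _ (by omega) W (by omega)]
    apply mapgrid_congr; intro a ha b hb
    by_cases hA : a = n + P
    · by_cases hB : P ≤ b ∧ b < P + W
      · rw [if_pos (by omega), if_pos (by omega)]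
        congr 1; omega
      · rw [if_neg (by omega), if_neg (by omega), if_neg (by omega)]
    · by_cases hC : P ≤ a ∧ a < P + n ∧ P ≤ b ∧ b < P + W
      · rw [if_neg (by omega), if_pos hC, if_pos (by omega)]
      · rw [if_neg (by omega), if_neg hC, if_neg (by omega)]

-- phase 2 (top and bottom border rows), one loop iteration
theorem topbot_step (P W H nh nw m : Nat) (F : Nat → Nat → Int) (G : List (List Int))
    (hG : G = (List.range nh).map (fun a => (List.range nw).map (fun b => F a b)))
    (hnh : nh = H + 2*P) (hnw : nw = W + 2*P) (hH : 1 ≤ H) (hm : m < P) :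
    PySem.List.pySetD
      (G.set m (spliceAssign (G.getD m []) (↑P) (-↑P)
        (PySem.List.slice (G.getD P []) (some ↑P) (some (-↑P)))))
      (-(↑m + 1))
      (spliceAssign
        (PySem.List.pyGetD (G.set m (spliceAssign (G.getD m []) (↑P) (-↑P)
          (PySem.List.slice (G.getD P []) (some ↑P) (some (-↑P))))) (-(↑m + 1)) [])
        (↑P) (-↑P)
        (PySem.List.slice (PySem.List.pyGetD (G.set m (spliceAssign (G.getD m []) (↑P) (-↑P)
          (PySem.List.slice (G.getD P []) (some ↑P) (some (-↑P))))) (-(↑P + 1)) []) (some ↑P) (some (-↑P))))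
    = (List.range nh).map (fun a => (List.range nw).map (fun b =>
        if a = m then (if P ≤ b ∧ b < P + W then F P b else F a b)
        else if a = nh - (m+1) then (if P ≤ b ∧ b < P + W then F (nh - (P+1)) b else F a b)
        else F a b)) := by
  subst hG
  have hP : 0 < P := by omega
  have hPnh : P < nh := by omega
  have hmnh : m < nh := by omega
  rw [grid_get_row nh nw m _ hmnh, grid_get_row nh nw P _ hPnh]
  rw [slice_map_row nw P W _ hnw hP]
  rw [spliceAssign_map nw P W _ _ hnw hP]
  rw [grid_set_row]
  rw [pyGetD_neg_succ _ m [] (by simp; omega)]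
  rw [pyGetD_neg_succ _ P [] (by simp; omega)]
  simp only [List.length_map, List.length_range]
  rw [grid_get_row nh nw (nh - (m+1)) _ (by omega)]
  rw [grid_get_row nh nw (nh - (P+1)) _ (by omega)]
  rw [slice_map_row nw P W _ hnw hP]
  rw [spliceAssign_map nw P W _ _ hnw hP]
  rw [pySetD_neg_succ _ m _ (by simp; omega)]
  simp only [List.length_map, List.length_range]
  rw [grid_set_row]
  apply mapgrid_congr; intro a ha b hb
  split_ifs <;> first | rfl | omega | (congr 1; omega)

-- phase 2 (top and bottom border rows), the whole loop
theorem topbot (P W H nh nw : Nat) (F : Nat → Nat → Int)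
    (hnh : nh = H + 2*P) (hnw : nw = W + 2*P) (hH : 1 ≤ H) :
    ∀ m, m ≤ P →
    List.foldl (fun x y =>
      PySem.List.pySetD
        (x.set y (spliceAssign (x.getD y []) (↑P) (-↑P)
          (PySem.List.slice (x.getD P []) (some ↑P) (some (-↑P)))))
        (-(↑y + 1))
        (spliceAssign
          (PySem.List.pyGetD (x.set y (spliceAssign (x.getD y []) (↑P) (-↑P)
            (PySem.List.slice (x.getD P []) (some ↑P) (some (-↑P))))) (-(↑y + 1)) [])
          (↑P) (-↑P)
          (PySem.List.slice (PySem.List.pyGetD (x.set y (spliceAssign (x.getD y []) (↑P) (-↑P)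
            (PySem.List.slice (x.getD P []) (some ↑P) (some (-↑P))))) (-(↑P + 1)) []) (some ↑P) (some (-↑P)))))
      ((List.range nh).map (fun a => (List.range nw).map (fun b => F a b))) (List.range m)
    = (List.range nh).map (fun a => (List.range nw).map (fun b =>
        if a < m then (if P ≤ b ∧ b < P + W then F P b else F a b)
        else if nh - m ≤ a then (if P ≤ b ∧ b < P + W then F (nh - 1 - P) b else F a b)
        else F a b)) := by
  intro m
  induction m with
  | zero =>
    intro _
    simp only [List.range_zero, List.foldl_nil]
    apply mapgrid_congr; intro a ha b hb
    rw [if_neg (by omega), if_neg (by omega)]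
  | succ m ih =>
    intro hm
    rw [List.range_succ, List.foldl_append, ih (by omega), List.foldl_cons, List.foldl_nil]
    rw [topbot_step P W H nh nw m _ _ rfl hnh hnw hH (by omega)]
    apply mapgrid_congr; intro a ha b hb
    split_ifs <;> first | rfl | omega | (congr 1; omega)

-- phase 3 (left and right border columns), one write pair on one row
theorem leftright_step (P W nh nw r j : Nat) (F : Nat → Nat → Int) (G : List (List Int))
    (hG : G = (List.range nh).map (fun a => (List.range nw).map (fun b => F a b)))
    (hr : r < nh) (hj : j < P) (hnw : nw = W + 2*P) (hW : 1 ≤ W) :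
    G.set r (PySem.List.pySetD ((G.getD r []).set j ((G.getD r []).getD P 0)) (-(↑j + 1))
      (PySem.List.pyGetD ((G.getD r []).set j ((G.getD r []).getD P 0)) (-(↑P + 1)) 0))
    = (List.range nh).map (fun a => (List.range nw).map (fun b =>
        if a = r then (if b = j then F r P else if b = nw - (j+1) then F r (nw - (P+1)) else F r b)
        else F a b)) := by
  subst hG
  have hP : 0 < P := by omega
  have hPnw : P < nw := by omega
  rw [grid_get_row nh nw r _ hr]
  rw [getD_map_range_lt nw P _ 0 hPnw]
  rw [set_map_range nw j]
  rw [pyGetD_neg_succ _ P 0 (by simp; omega)]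
  simp only [List.length_map, List.length_range]
  rw [getD_map_range_lt nw (nw - (P+1)) _ 0 (by omega)]
  rw [pySetD_neg_succ _ j _ (by simp; omega)]
  simp only [List.length_map, List.length_range]
  rw [set_map_range nw (nw - (j+1))]
  rw [grid_set_row]
  apply mapgrid_congr; intro a ha b hb
  split_ifs <;> first | rfl | omega | (congr 1; omega)

-- phase 3, inner loop over the pad columns of one row
theorem leftright_inner (P W nh nw r : Nat) (F : Nat → Nat → Int)
    (hr : r < nh) (hnw : nw = W + 2*P) (hW : 0 < P → 1 ≤ W) :
    ∀ m, m ≤ P →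
    List.foldl (fun x y1 =>
      x.set r (PySem.List.pySetD ((x.getD r []).set y1 ((x.getD r []).getD P 0)) (-(↑y1 + 1))
        (PySem.List.pyGetD ((x.getD r []).set y1 ((x.getD r []).getD P 0)) (-(↑P + 1)) 0)))
      ((List.range nh).map (fun a => (List.range nw).map (fun b => F a b))) (List.range m)
    = (List.range nh).map (fun a => (List.range nw).map (fun b =>
        if a = r ∧ b < m then F r P
        else if a = r ∧ nw - m ≤ b then F r (nw - (P+1))
        else F a b)) := by
  intro m
  induction m with
  | zero =>
    intro _
    simp only [List.range_zero, List.foldl_nil]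
    apply mapgrid_congr; intro a ha b hb
    rw [if_neg (by omega), if_neg (by omega)]
  | succ m ih =>
    intro hm
    have hW1 : 1 ≤ W := hW (by omega)
    rw [List.range_succ, List.foldl_append, ih (by omega), List.foldl_cons, List.foldl_nil]
    rw [leftright_step P W nh nw r m _ _ rfl hr (by omega) hnw hW1]
    apply mapgrid_congr; intro a ha b hb
    split_ifs <;> first | rfl | omega | (congr 1; omega)

-- phase 3, outer loop over all rows
theorem leftright_outer (P W nh nw : Nat) (F : Nat → Nat → Int)
    (hnw : nw = W + 2*P) (hW : 0 < P → 1 ≤ W) :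
    ∀ n, n ≤ nh →
    List.foldl (fun x y =>
      List.foldl (fun x y1 =>
        x.set y (PySem.List.pySetD ((x.getD y []).set y1 ((x.getD y []).getD P 0)) (-(↑y1 + 1))
          (PySem.List.pyGetD ((x.getD y []).set y1 ((x.getD y []).getD P 0)) (-(↑P + 1)) 0)))
        x (List.range P))
      ((List.range nh).map (fun a => (List.range nw).map (fun b => F a b))) (List.range n)
    = (List.range nh).map (fun a => (List.range nw).map (fun b =>
        if a < n ∧ b < P then F a P
        else if a < n ∧ nw - P ≤ b then F a (nw - (P+1))
        else F a b)) := by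
  intro n
  induction n with
  | zero =>
    intro _
    simp only [List.range_zero, List.foldl_nil]
    apply mapgrid_congr; intro a ha b hb
    rw [if_neg (by omega), if_neg (by omega)]
  | succ n ih =>
    intro hn
    rw [List.range_succ, List.foldl_append, ih (by omega), List.foldl_cons, List.foldl_nil]
    rw [leftright_inner P W nh nw n _ (by omega) hnw hW P (le_refl P)]
    apply mapgrid_congr; intro a ha b hb
    split_ifs <;> first | rfl | omega | (congr 1; omega)

-- the composed edge-mode formula of A equals B's clamped lookup
theorem final_edge (P W H nh nw : Nat) (v : Nat → Nat → Int)
    (hnh : nh = H + 2*P) (hnw : nw = W + 2*P) (hH : 1 ≤ H) (hW : 0 < P → 1 ≤ W)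
    (a b : Nat) (ha : a < nh) (hb : b < nw) :
    (fun F2 =>
      if a < nh ∧ b < P then F2 a P
      else if a < nh ∧ nw - P ≤ b then F2 a (nw - (P+1))
      else F2 a b)
    ((fun (F1 : Nat → Nat → Int) => fun x c =>
      if x < P then (if P ≤ c ∧ c < P + W then F1 P c else F1 x c)
      else if nh - P ≤ x then (if P ≤ c ∧ c < P + W then F1 (nh - 1 - P) c else F1 x c)
      else F1 x c)
     (fun x c => if P ≤ x ∧ x < P + H ∧ P ≤ c ∧ c < P + W then v (x - P) (c - P) else 0))
    = v (if a < P then 0 else if a < P + H then a - P else H - 1)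
        (if b < P then 0 else if b < P + W then b - P else W - 1) := by
  have hW1 : 0 < P ∨ 1 ≤ W ∨ nw = 0 := by omega
  simp only []
  split_ifs <;>
    first | rfl | omega
          | (congr 1 <;> first | omega | (congr 1 <;> omega))
          | (exfalso; omega)

-- ===== VERDICT (by name: the statement is the Claim_ definition above) =====
theorem pad_image_spec : Claim_equal_pad_image := by
  intro image pad_size mode _ hpre
  obtain ⟨hne, hp0, _hrows, hwz⟩ := hpre
  obtain ⟨P, rfl⟩ := Int.eq_ofNat_of_zero_le hp0
  unfold Spec_pad_image
  unfold pad_image pad_image_alt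
  simp only [PySem.List.len_eq, PySem.List.pyGetD_zero]
  have hH : 1 ≤ image.length := by
    cases image with
    | nil => exact absurd rfl hne
    | cons x xs => simp
  have hc1 : ((image.length : Int) + 2 * ↑P) = ((image.length + 2*P : Nat) : Int) := by
    push_cast; ring
  have hc2 : (((image.getD 0 []).length : Int) + 2 * ↑P)
      = (((image.getD 0 []).length + 2*P : Nat) : Int) := by
    push_cast; ring
  rw [hc1, hc2]
  simp only [PySem.List.pyRange_zero_nat, List.foldl_map, List.map_map, Function.comp_def,
    ← Nat.cast_add, PySem.List.pySetD_natCast, PySem.List.pyGetD_natCast]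
  by_cases hmode : mode = "edge"
  · rw [if_pos hmode, if_pos hmode]
    have hW : 0 < P → 1 ≤ (image.getD 0 []).length := by
      intro hp
      have := hwz hmode (by exact_mod_cast hp)
      rw [PySem.List.pyGetD_zero] at this
      cases h : (image.getD 0 []) with
      | nil => exact absurd h this
      | cons x xs => simp
    rw [interior_outer P ((image.getD 0 []).length) (image.length + 2*P)
      ((image.getD 0 []).length + 2*P) (fun y y1 => (image.getD y []).getD y1 0)
      (fun _ _ => 0) image.length (by omega) (by omega)]
    rw [topbot P ((image.getD 0 []).length) image.length (image.length + 2*P)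
      ((image.getD 0 []).length + 2*P) _ rfl rfl hH P (le_refl P)]
    rw [leftright_outer P ((image.getD 0 []).length) (image.length + 2*P)
      ((image.getD 0 []).length + 2*P) _ rfl hW (image.length + 2*P) (le_refl _)]
    apply mapgrid_congr; intro a ha b hb
    have hrc : (min (max ((a : Int) - ↑P) 0) (↑image.length - 1))
        = (((if a < P then 0 else if a < P + image.length then a - P else image.length - 1 : Nat)) : Int) := by
      split_ifs <;> push_cast <;> omega
    have hW1 : 1 ≤ (image.getD 0 []).length := by
      rcases Nat.eq_zero_or_pos P with h | h
      · omega
      · exact hW h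
    have hcc : (min (max ((b : Int) - ↑P) 0) (↑(image.getD 0 []).length - 1))
        = (((if b < P then 0 else if b < P + (image.getD 0 []).length then b - P
            else (image.getD 0 []).length - 1 : Nat)) : Int) := by
      split_ifs <;> push_cast <;> omega
    rw [hrc, hcc, PySem.List.pyGetD_natCast, PySem.List.pyGetD_natCast]
    exact final_edge P ((image.getD 0 []).length) image.length (image.length + 2*P)
      ((image.getD 0 []).length + 2*P) (fun x c => (image.getD x []).getD c 0)
      rfl rfl hH hW a b ha hb
  · rw [if_neg hmode, if_neg hmode]
    rw [interior_outer P ((image.getD 0 []).length) (image.length + 2*P)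
      ((image.getD 0 []).length + 2*P) (fun y y1 => (image.getD y []).getD y1 0)
      (fun _ _ => 0) image.length (by omega) (by omega)]
    apply mapgrid_congr; intro a ha b hb
    by_cases hc : P ≤ a ∧ a < P + image.length ∧ P ≤ b ∧ b < P + (image.getD 0 []).length
    · rw [if_pos hc, if_pos (by push_cast; omega)]
      rw [show ((a : Int) - ↑P) = ((a - P : Nat) : Int) by push_cast; omega]
      rw [show ((b : Int) - ↑P) = ((b - P : Nat) : Int) by push_cast; omega]
      rw [PySem.List.pyGetD_natCast, PySem.List.pyGetD_natCast]
    · rw [if_neg hc, if_neg (by push_cast; omega)]
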